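-- pv_equiv track=rewrite | github.com/Parrazyte/winds | general/general_tools.py | interval_extract
-- ===== SOURCE A (Python) =====
-- def interval_extract(list):
--
--     '''
--     From a list of numbers, outputs a list of the integer intervals contained inside it
--     '''
--
--     if len(list)==0:
--         return list
--
--     list = sorted(set(list))
--     range_start = previous_number = list[0]
--
--     for number in list[1:]:
--         if number == previous_number + 1:
--             previous_number = number
--         else:
--             yield [range_start, previous_number]
--             range_start = previous_number = number
--     yield [range_start, previous_number]
-- ===== SOURCE B (Python) =====
-- def interval_extract(list):
--     '''
--     From a list of numbers, outputs a list of the integer intervals contained inside it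
--     '''
--     s = set(list)
--     starts = sorted(x for x in s if x - 1 not in s)
--     ends = sorted(x for x in s if x + 1 not in s)
--     for a, b in zip(starts, ends):
--         yield [a, b]
-- ===== Notes on version B (the rewrite author's own statement) =====
-- stated objective: alternative
-- what changed: Replaces A's sorted sequential scan with prev/start accumulator state by set-membership boundary detection: interval starts are the elements x with x-1 not in the set, ends those with x+1 not in the set, each sorted and zipped together; no run scan or carried state at all.
import Mathlib
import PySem

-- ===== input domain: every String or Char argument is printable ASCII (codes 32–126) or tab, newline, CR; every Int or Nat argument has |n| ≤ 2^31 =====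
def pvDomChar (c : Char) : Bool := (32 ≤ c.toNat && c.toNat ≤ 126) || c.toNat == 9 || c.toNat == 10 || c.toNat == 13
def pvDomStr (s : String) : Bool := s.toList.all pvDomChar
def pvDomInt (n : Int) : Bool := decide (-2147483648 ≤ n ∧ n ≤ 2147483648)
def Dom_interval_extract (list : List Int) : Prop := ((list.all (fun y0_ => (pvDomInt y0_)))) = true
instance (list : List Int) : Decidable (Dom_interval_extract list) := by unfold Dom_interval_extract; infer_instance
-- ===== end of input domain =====

-- B replaces A's sorted sequential run scan (range_start/previous_number accumulator) with
-- set-membership boundary detection (starts: x-1 ∉ s; ends: x+1 ∉ s, sorted and zipped);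
-- equal return values proved on the whole domain.
-- ===== PORT A =====
-- the for-loop of A: state (range_start, previous_number), yields accumulated in order
def auxA (rs prev : Int) : List Int → List (List Int)
  | [] => [[rs, prev]]
  | n :: t => if n = prev + 1 then auxA rs n t else [rs, prev] :: auxA n n t

def interval_extract (list : List Int) : List (List Int) :=
  if list.length == 0 then []
  else
    match PySem.List.sorted (PySem.Set.ofList list) (fun x => x) false with
    | [] => []  -- unreachable: sorted(set(l)) of a nonempty l is nonempty
    | x :: t => auxA x x t

-- ===== PORT B =====
def interval_extract_alt (list : List Int) : List (List Int) :=
  let s := PySem.Set.ofList list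
  let starts := PySem.List.sorted (s.filter (fun x => decide ((x - 1) ∉ s))) (fun x => x) false
  let ends := PySem.List.sorted (s.filter (fun x => decide ((x + 1) ∉ s))) (fun x => x) false
  (starts.zip ends).map (fun p => [p.1, p.2])

-- ===== PRECONDITION & SPEC =====
def Spec_interval_extract (list : List Int) (out : List (List Int)) : Prop := out = interval_extract_alt list
instance (list : List Int) (out : List (List Int)) : Decidable (Spec_interval_extract list out) := by unfold Spec_interval_extract; infer_instance

-- ===== CLAIM (what is proved, stated in full; the proofs are below) =====
def Claim_equal_interval_extract : Prop := ∀ (list : List Int), Dom_interval_extract list → Spec_interval_extract list (interval_extract list)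

-- ===== LEMMAS AND PROOFS =====
-- sorting commutes with filtering (distinct elements): sorted(filter p s) = filter p (sorted s)
theorem sorted_filter_comm (s : List Int) (p : Int → Bool) (hnd : s.Nodup) :
    PySem.List.sorted (s.filter p) (fun x => x) false =
      (PySem.List.sorted s (fun x => x) false).filter p := by
  apply PySem.List.sorted_eq_of_perm_of_pairwise_lt
  · exact ((PySem.List.sorted_perm s (fun x => x) false).filter p)
  · exact ((PySem.List.sorted_pairwise s (fun x => x)).imp₂
      (fun a b hle hne => lt_of_le_of_ne hle hne)
      (((PySem.List.sorted_perm s (fun x => x) false).nodup_iff.mpr hnd))).filter p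

-- A's scan over a strictly increasing list equals the zipped boundary filters
theorem auxA_eq_zip (t : List Int) : ∀ rs prev, (prev :: t).Pairwise (· < ·) →
    auxA rs prev t =
      ((rs :: t.filter (fun x => decide ((x - 1) ∉ prev :: t))).zip
        ((prev :: t).filter (fun x => decide ((x + 1) ∉ t)))).map (fun p => [p.1, p.2]) := by
  induction t with
  | nil => intro rs prev _; simp [auxA]
  | cons n t ih =>
      intro rs prev hp
      have hpn : prev < n := (List.pairwise_cons.mp hp).1 n (by simp)
      have hpt : ∀ y ∈ t, prev < y := fun y hy =>
        (List.pairwise_cons.mp hp).1 y (by simp [hy])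
      have hnp : (n :: t).Pairwise (· < ·) := (List.pairwise_cons.mp hp).2
      have hnt : ∀ y ∈ t, n < y := (List.pairwise_cons.mp hnp).1
      by_cases h : n = prev + 1
      · -- continue the run
        have hs : t.filter (fun x => decide ((x - 1) ∉ prev :: n :: t)) =
            t.filter (fun x => decide ((x - 1) ∉ n :: t)) := by
          apply List.filter_congr
          intro x hx
          have : x - 1 ≠ prev := by have := hnt x hx; omega
          simp [this]
        have he : (n :: t).filter (fun x => decide ((x + 1) ∉ n :: t)) =
            (n :: t).filter (fun x => decide ((x + 1) ∉ t)) := by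
          apply List.filter_congr
          intro x hx
          have : x + 1 ≠ n := by
            rcases List.mem_cons.mp hx with rfl | hx'
            · omega
            · have := hnt x hx'; omega
          simp [this]
        have e1 : (n :: t).filter (fun x => decide ((x - 1) ∉ prev :: n :: t)) =
            t.filter (fun x => decide ((x - 1) ∉ n :: t)) := by
          rw [List.filter_cons_of_neg (by
            have : n - 1 = prev := by omega
            simp [this]), hs]
        have e2 : (prev :: n :: t).filter (fun x => decide ((x + 1) ∉ n :: t)) =
            (n :: t).filter (fun x => decide ((x + 1) ∉ t)) := by
          rw [List.filter_cons_of_neg (by simp [← h]), he]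
        simp only [auxA, if_pos h]
        rw [ih rs n hnp, e1, e2]
      · -- break: n starts a new run
        have hn2 : prev + 1 < n := by omega
        have hs : t.filter (fun x => decide ((x - 1) ∉ prev :: n :: t)) =
            t.filter (fun x => decide ((x - 1) ∉ n :: t)) := by
          apply List.filter_congr
          intro x hx
          have : x - 1 ≠ prev := by have := hnt x hx; omega
          simp [this]
        have he : (n :: t).filter (fun x => decide ((x + 1) ∉ n :: t)) =
            (n :: t).filter (fun x => decide ((x + 1) ∉ t)) := by
          apply List.filter_congr
          intro x hx
          have : x + 1 ≠ n := by
            rcases List.mem_cons.mp hx with rfl | hx'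
            · omega
            · have := hnt x hx'; omega
          simp [this]
        have hnstart : n - 1 ∉ prev :: n :: t := by
          simp only [List.mem_cons, not_or]
          refine ⟨by omega, by omega, fun hmem => ?_⟩
          have := hnt _ hmem; omega
        have hpend : prev + 1 ∉ n :: t := by
          simp only [List.mem_cons, not_or]
          exact ⟨by omega, fun hm => by have := hnt _ hm; omega⟩
        have e1 : (n :: t).filter (fun x => decide ((x - 1) ∉ prev :: n :: t)) =
            n :: t.filter (fun x => decide ((x - 1) ∉ n :: t)) := by
          rw [List.filter_cons_of_pos (by simpa using hnstart), hs]
        have e2 : (prev :: n :: t).filter (fun x => decide ((x + 1) ∉ n :: t)) =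
            prev :: (n :: t).filter (fun x => decide ((x + 1) ∉ t)) := by
          rw [List.filter_cons_of_pos (by simpa using hpend), he]
        simp only [auxA, if_neg h]
        rw [ih n n hnp, e1, e2]
        simp

-- ===== VERDICT (by name: the statement is the Claim_ definition above) =====
theorem interval_extract_spec : Claim_equal_interval_extract := by
  intro list _
  unfold Spec_interval_extract interval_extract interval_extract_alt
  have hnd : (PySem.Set.ofList list).Nodup := PySem.Set.nodup_ofList list
  dsimp only
  rw [sorted_filter_comm _ _ hnd, sorted_filter_comm _ _ hnd]
  have hlt := PySem.List.sorted_ofList_pairwise_lt (xs := list)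
  have hperm := PySem.List.sorted_perm (PySem.Set.ofList list) (fun x => x) false
  cases list with
  | nil => simp [PySem.List.sorted, PySem.Set.ofList]
  | cons a l =>
      simp only [List.length_cons]
      cases hd : PySem.List.sorted (PySem.Set.ofList (a :: l)) (fun x => x) false with
      | nil =>
          exfalso
          rw [hd] at hperm
          have h0 : PySem.Set.ofList (a :: l) = [] := hperm.symm.eq_nil
          have ha : a ∈ PySem.Set.ofList (a :: l) := by
            rw [PySem.Set.mem_ofList]; simp
          rw [h0] at ha
          simp at ha
      | cons x t =>
          rw [hd] at hlt hperm
          -- the filter predicates test membership in set(list); swap to membership in the sorted list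
          have hms : (x :: t).filter (fun y => decide ((y - 1) ∉ PySem.Set.ofList (a :: l))) =
              (x :: t).filter (fun y => decide ((y - 1) ∉ x :: t)) := by
            apply List.filter_congr
            intro y _
            simp [hperm.mem_iff]
          have hme : (x :: t).filter (fun y => decide ((y + 1) ∉ PySem.Set.ofList (a :: l))) =
              (x :: t).filter (fun y => decide ((y + 1) ∉ x :: t)) := by
            apply List.filter_congr
            intro y _
            simp [hperm.mem_iff]
          have hxt : ∀ y ∈ t, x < y := (List.pairwise_cons.mp hlt).1
          have hstart : (x :: t).filter (fun y => decide ((y - 1) ∉ x :: t)) =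
              x :: t.filter (fun y => decide ((y - 1) ∉ x :: t)) := by
            apply List.filter_cons_of_pos
            have hx1 : x - 1 ∉ x :: t := by
              simp only [List.mem_cons, not_or]
              exact ⟨by omega, fun hm => by have := hxt _ hm; omega⟩
            simpa using hx1
          have hend : (x :: t).filter (fun y => decide ((y + 1) ∉ x :: t)) =
              (x :: t).filter (fun y => decide ((y + 1) ∉ t)) := by
            apply List.filter_congr
            intro y hy
            have : y + 1 ≠ x := by
              rcases List.mem_cons.mp hy with rfl | hy'
              · omega
              · have := hxt _ hy'; omega
            simp [this]
          rw [hms, hme, hstart, hend, if_neg (by simp)]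
          show auxA x x t = _
          exact auxA_eq_zip t x x hlt
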